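-- pv_equiv track=rewrite | github.com/anthonyceponis/british-informatics-olympiad-solutions | 2009/[1]-digit-words.py | getDigitWord
-- ===== SOURCE A (Python) =====
-- def getDigitWord(word):
--     words = ["ONE", "TWO", "THREE", "FOUR", "FIVE", "SIX", "SEVEN", "EIGHT", "NINE"]
--     for i in range(len(words)):
--         currentComparisonWordIndex = 0
--         for j in range(len(word)):
--             if words[i][currentComparisonWordIndex] == word[j]:
--                 currentComparisonWordIndex += 1
--             if currentComparisonWordIndex == len(words[i]):
--                 return str(i+1)
--     return "NO"
-- ===== SOURCE B (Python) =====
-- def getDigitWord(word):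
--     words = ["ONE", "TWO", "THREE", "FOUR", "FIVE", "SIX", "SEVEN", "EIGHT", "NINE"]
--     # One pass over the input: advance a match pointer for all nine words at once.
--     progress = [0] * len(words)
--     for ch in word:
--         for i, w in enumerate(words):
--             if progress[i] < len(w) and w[progress[i]] == ch:
--                 progress[i] += 1
--     # Then pick the first word that completed.
--     for i, w in enumerate(words):
--         if progress[i] == len(w):
--             return str(i + 1)
--     return "NO"
-- ===== Notes on version B (the rewrite author's own statement) =====
-- stated objective: alternative
-- what changed: B inverts the loop nesting: a single pass over the input advances nine match pointers (one per digit-word) simultaneously, then a selection pass returns the first completed word, instead of A's nine separate rescans of the input each with a single pointer.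
import Mathlib
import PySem

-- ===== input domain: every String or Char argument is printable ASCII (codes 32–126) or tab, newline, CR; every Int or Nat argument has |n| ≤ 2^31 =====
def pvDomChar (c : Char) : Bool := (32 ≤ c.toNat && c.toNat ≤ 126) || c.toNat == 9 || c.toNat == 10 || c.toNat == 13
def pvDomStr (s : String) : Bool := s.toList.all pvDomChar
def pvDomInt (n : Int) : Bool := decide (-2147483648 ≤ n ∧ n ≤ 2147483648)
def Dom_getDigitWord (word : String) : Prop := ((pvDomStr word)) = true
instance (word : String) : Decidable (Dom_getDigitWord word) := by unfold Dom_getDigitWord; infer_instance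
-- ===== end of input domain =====

-- B inverts the loop nesting: one pass over the input advances nine match pointers
-- simultaneously, then a selection pass returns the first completed word
-- (objective: alternative; same cost).

-- ===== PORT A =====
-- the nine digit-words, as in both Pythons
def pvWords : List (List Char) :=
  ["ONE".toList, "TWO".toList, "THREE".toList, "FOUR".toList, "FIVE".toList,
   "SIX".toList, "SEVEN".toList, "EIGHT".toList, "NINE".toList]

-- A's inner 'for j in range(len(word))' loop: state = currentComparisonWordIndex;
-- returns true iff the early 'return' fires
def pvInnerA (tgt : List Char) : List Char → Nat → Bool
  | [], _ => false
  | c :: cs, idx =>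
    let idx' := if tgt[idx]? = some c then idx + 1 else idx
    if idx' = tgt.length then true else pvInnerA tgt cs idx'

-- A's outer 'for i in range(len(words))' loop
def pvOuterA (ws : List (List Char)) (i : Int) (cs : List Char) : String :=
  match ws with
  | [] => "NO"
  | tgt :: rest =>
    if pvInnerA tgt cs 0 then PySem.Int.toStr (i + 1) else pvOuterA rest (i + 1) cs

def getDigitWord (word : String) : String := pvOuterA pvWords 0 word.toList

-- ===== PORT B =====
-- B's per-word pointer update for one input character:
-- 'if progress[i] < len(w) and w[progress[i]] == ch: progress[i] += 1'
def pvU (w : List Char) (p : Nat) (ch : Char) : Nat :=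
  if p < w.length ∧ w[p]? = some ch then p + 1 else p

-- B's inner 'for i, w in enumerate(words)' loop updating the progress list
def pvUpd (ch : Char) : List (List Char) → List Nat → List Nat
  | w :: ws, p :: ps => pvU w p ch :: pvUpd ch ws ps
  | _, _ => []

-- B's outer 'for ch in word' loop
def pvScan (ws : List (List Char)) (cs : List Char) (ps : List Nat) : List Nat :=
  cs.foldl (fun s ch => pvUpd ch ws s) ps

-- B's final 'for i, w in enumerate(words)' selection loop
def pvSelect (ws : List (List Char)) (ps : List Nat) (i : Int) : String :=
  match ws, ps with
  | w :: ws', p :: ps' =>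
    if p = w.length then PySem.Int.toStr (i + 1) else pvSelect ws' ps' (i + 1)
  | _, _ => "NO"

def getDigitWord_alt (word : String) : String :=
  pvSelect pvWords (pvScan pvWords word.toList (List.replicate pvWords.length 0)) 0

-- ===== PRECONDITION & SPEC =====
def Spec_getDigitWord (word : String) (out : String) : Prop := out = getDigitWord_alt word
instance (word : String) (out : String) : Decidable (Spec_getDigitWord word out) := by unfold Spec_getDigitWord; infer_instance

-- ===== CLAIM (what is proved, stated in full; the proofs are below) =====
def Claim_equal_getDigitWord : Prop := ∀ (word : String), Dom_getDigitWord word → Spec_getDigitWord word (getDigitWord word)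

-- ===== LEMMAS AND PROOFS =====

-- the one-character update acts componentwise
theorem pvUpd_zip (ch : Char) : ∀ (ws : List (List Char)) (ps : List Nat),
    pvUpd ch ws ps = List.zipWith (fun w p => pvU w p ch) ws ps := by
  intro ws
  induction ws with
  | nil => intro ps; cases ps <;> rfl
  | cons w ws ih => intro ps; cases ps with
    | nil => rfl
    | cons p ps => simp [pvUpd, ih]

theorem zip_proj : ∀ (ws : List (List Char)) (ps : List Nat), ws.length = ps.length →
    List.zipWith (fun (_ : List Char) (p : Nat) => p) ws ps = ps := by
  intro ws
  induction ws with
  | nil => intro ps h; cases ps with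
    | nil => rfl
    | cons p ps => simp at h
  | cons w ws ih => intro ps h; cases ps with
    | nil => simp at h
    | cons p ps => simp [List.zipWith, ih ps (by simpa using h)]

theorem zip_zip (f h : List Char → Nat → Nat) :
    ∀ (ws : List (List Char)) (ps : List Nat),
    List.zipWith f ws (List.zipWith h ws ps) = List.zipWith (fun w p => f w (h w p)) ws ps := by
  intro ws
  induction ws with
  | nil => intro ps; rfl
  | cons w ws ih => intro ps; cases ps with
    | nil => rfl
    | cons p ps => simp [List.zipWith, ih]

theorem pvUpd_length (ch : Char) : ∀ (ws : List (List Char)) (ps : List Nat),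
    ws.length = ps.length → (pvUpd ch ws ps).length = ps.length := by
  intro ws
  induction ws with
  | nil => intro ps h; cases ps with
    | nil => rfl
    | cons p ps => simp at h
  | cons w ws ih => intro ps h; cases ps with
    | nil => simp at h
    | cons p ps => simp [pvUpd, ih ps (by simpa using h)]

-- the whole scan acts componentwise: each pointer evolves by its own fold
theorem pvScan_zip : ∀ (cs : List Char) (ws : List (List Char)) (ps : List Nat),
    ws.length = ps.length →
    pvScan ws cs ps = List.zipWith (fun w p => cs.foldl (pvU w) p) ws ps := by
  intro cs
  induction cs with
  | nil =>
    intro ws ps h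
    exact (zip_proj ws ps h).symm
  | cons c cs ih =>
    intro ws ps h
    have h' : ws.length = (pvUpd c ws ps).length := by rw [pvUpd_length c ws ps h, h]
    show pvScan ws cs (pvUpd c ws ps) = _
    rw [ih ws (pvUpd c ws ps) h', pvUpd_zip, zip_zip]
    rfl

-- a completed pointer stays completed
theorem pvU_cap (tgt : List Char) : ∀ (cs : List Char),
    cs.foldl (pvU tgt) tgt.length = tgt.length := by
  intro cs
  induction cs with
  | nil => rfl
  | cons c cs ih => simpa [pvU] using ih

-- A's early-returning pointer loop succeeds iff B's capped fold ends at the full length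
theorem pvInner_fold (tgt : List Char) : ∀ (cs : List Char) (idx : Nat), idx < tgt.length →
    (pvInnerA tgt cs idx = true ↔ cs.foldl (pvU tgt) idx = tgt.length) := by
  intro cs
  induction cs with
  | nil =>
    intro idx h
    simp [pvInnerA]
    omega
  | cons c cs ih =>
    intro idx h
    have hg : tgt[idx]? = some (tgt[idx]) := List.getElem?_eq_getElem h
    simp only [pvInnerA, List.foldl]
    by_cases hc : tgt[idx] = c
    · have hm : tgt[idx]? = some c := by rw [hg, hc]
      rw [if_pos hm]
      have hu : pvU tgt idx c = idx + 1 := by simp [pvU, h, hc]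
      rw [hu]
      by_cases hl : idx + 1 = tgt.length
      · simp [hl, pvU_cap]
      · rw [if_neg hl]; exact ih (idx + 1) (by omega)
    · have hm : ¬ tgt[idx]? = some c := by rw [hg]; simpa using hc
      rw [if_neg hm]
      have hu : pvU tgt idx c = idx := by simp [pvU, hm]
      rw [hu, if_neg (by omega : ¬ idx = tgt.length)]
      exact ih idx h

-- zipWith against a replicate of zeros is a map
theorem zip_replicate {β : Type} (f : List Char → Nat → β) :
    ∀ (ws : List (List Char)),
    List.zipWith f ws (List.replicate ws.length 0) = ws.map (fun w => f w 0) := by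
  intro ws
  induction ws with
  | nil => rfl
  | cons w ws ih => simp [List.replicate, ih]

-- A's outer loop equals B's selection over the per-word fold results
theorem pvOuter_select (cs : List Char) : ∀ (ws : List (List Char)), (∀ w ∈ ws, w ≠ []) →
    ∀ (i : Int),
    pvOuterA ws i cs = pvSelect ws (ws.map (fun w => cs.foldl (pvU w) 0)) i := by
  intro ws
  induction ws with
  | nil => intro _ i; rfl
  | cons w rest ih =>
    intro hne i
    have h0 : 0 < w.length := List.length_pos_iff.mpr (hne w (by simp))
    have := pvInner_fold w cs 0 h0
    simp only [pvOuterA, List.map, pvSelect]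
    by_cases hA : pvInnerA w cs 0 = true
    · simp [hA, this.mp hA]
    · have hB : ¬ cs.foldl (pvU w) 0 = w.length := fun hc => hA (this.mpr hc)
      simp [hA, hB, ih (fun x hx => hne x (by simp [hx])) (i + 1)]

-- ===== VERDICT (by name: the statement is the Claim_ definition above) =====
theorem getDigitWord_spec : Claim_equal_getDigitWord := by
  intro word _
  unfold Spec_getDigitWord getDigitWord getDigitWord_alt
  rw [pvScan_zip word.toList pvWords (List.replicate pvWords.length 0) (by simp), zip_replicate]
  exact pvOuter_select word.toList pvWords (by decide) 0
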